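-- pv_equiv track=rewrite | github.com/Luolingwei/LeetCode | UnionFind/Q1627_Graph Connectivity With Threshold.py | areConnected
-- ===== SOURCE A (Python) =====
-- def areConnected(n: int, threshold: int, queries):
--     def find(x):
--         while x in uf:
--             while uf[x] in uf:
--                 uf[x] = uf[uf[x]]
--             x = uf[x]
--         return x
--
--     def union(x, y):
--         px, py = find(x), find(y)
--         if px == py: return False
--         uf[px] = py
--         return True
--
--     if not threshold: return [True]*len(queries)
--     uf = {}
--     for x in range(1, n + 1):
--         for y in range(2 * x, n + 1, x):
--             if x > threshold:
--                 union(x, y)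
--
--     return [find(x) == find(y) for x, y in queries]
-- ===== SOURCE B (Python) =====
-- def areConnected(n, threshold, queries):
--     # eager "quick-find" partition: direct component labels, relabel the smaller
--     # component on each merge (no parent pointers, no find loops)
--     if threshold == 0:
--         return [True] * len(queries)
--     label = {}    # node -> component id
--     members = {}  # component id -> list of its nodes
--     for x in range(max(threshold + 1, 1), n + 1):
--         for y in range(2 * x, n + 1, x):
--             for v in (x, y):
--                 if v not in label:
--                     label[v] = v
--                     members[v] = [v]
--             lx, ly = label[x], label[y]
--             if lx != ly:
--                 if len(members[lx]) > len(members[ly]):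
--                     lx, ly = ly, lx
--                 for v in members[lx]:
--                     label[v] = ly
--                 members[ly].extend(members[lx])
--                 del members[lx]
--     return [a == b or (a in label and b in label and label[a] == label[b])
--             for a, b in queries]
-- ===== Notes on version B (the rewrite author's own statement) =====
-- stated objective: faster
-- what changed: Replaces the lazy pointer-chasing union-find (parent dict, nested while-loop find with path compression) by an eager quick-find partition: a flat node->component-label dict plus explicit member lists, merging by relabelling the smaller component, so queries are direct label lookups and no parent chains exist at all; the below-threshold x ranges are never iterated.
import Mathlib
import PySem

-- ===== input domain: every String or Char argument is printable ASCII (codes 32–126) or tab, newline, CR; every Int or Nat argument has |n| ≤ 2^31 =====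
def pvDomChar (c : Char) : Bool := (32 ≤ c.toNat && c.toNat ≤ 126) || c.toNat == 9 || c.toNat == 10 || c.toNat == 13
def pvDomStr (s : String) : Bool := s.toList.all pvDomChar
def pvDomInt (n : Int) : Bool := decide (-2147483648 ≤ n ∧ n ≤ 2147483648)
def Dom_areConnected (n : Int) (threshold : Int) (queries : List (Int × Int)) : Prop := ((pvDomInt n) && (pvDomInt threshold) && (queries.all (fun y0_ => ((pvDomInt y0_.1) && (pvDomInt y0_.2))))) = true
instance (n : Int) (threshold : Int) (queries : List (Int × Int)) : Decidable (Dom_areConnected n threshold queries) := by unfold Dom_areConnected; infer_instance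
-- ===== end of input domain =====

-- B replaces A's lazy pointer-chasing union-find (parent dict + compressing find loops) by an
-- eager quick-find partition (direct node->label dict, relabelling the smaller side on merge).

-- ===== PORT A =====
-- inner `while uf[x] in uf: uf[x] = uf[uf[x]]` (fuel-guarded; the fuel suffices on every
-- state A reaches, proved below)
def pvCompress (fuel : Nat) (uf : PySem.Dict Int Int) (x : Int) : PySem.Dict Int Int :=
  match fuel with
  | 0 => uf
  | f + 1 =>
    match uf.get? x with
    | none => uf
    | some p =>
      match uf.get? p with
      | none => uf
      | some pp => pvCompress f (uf.insert x pp) x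

-- `def find(x): while x in uf: …; x = uf[x]; return x` — returns the root and the
-- mutated dict
def pvFind (fuel : Nat) (uf : PySem.Dict Int Int) (x : Int) : Int × PySem.Dict Int Int :=
  match fuel with
  | 0 => (x, uf)
  | f + 1 =>
    match uf.get? x with
    | none => (x, uf)
    | some _ =>
      let uf1 := pvCompress (uf.size + 1) uf x
      match uf1.get? x with
      | none => (x, uf1)
      | some p => pvFind f uf1 p

-- `def union(x, y)` (the returned bool is never used by A, so only the state is kept)
def pvUnion (uf : PySem.Dict Int Int) (x y : Int) : PySem.Dict Int Int :=
  let r1 := pvFind (uf.size + 1) uf x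
  let r2 := pvFind (r1.2.size + 1) r1.2 y
  if r1.1 == r2.1 then r2.2 else r2.2.insert r1.1 r2.1

def areConnected (n : Int) (threshold : Int) (queries : List (Int × Int)) : List Bool :=
  if threshold == 0 then queries.map (fun _ => true)
  else
    let uf := (PySem.List.pyRange 1 (n + 1) 1).foldl (fun uf x =>
      (PySem.List.pyRange (2 * x) (n + 1) x).foldl (fun uf y =>
        if x > threshold then pvUnion uf x y else uf) uf) PySem.Dict.empty
    (queries.foldl (fun acc q =>
      let r1 := pvFind (acc.2.size + 1) acc.2 q.1
      let r2 := pvFind (r1.2.size + 1) r1.2 q.2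
      (acc.1 ++ [r1.1 == r2.1], r2.2)) (([] : List Bool), uf)).1

-- ===== PORT B =====
-- state: (label : node -> component id, members : component id -> list of nodes)
def pvTouch (st : PySem.Dict Int Int × PySem.Dict Int (List Int)) (v : Int) :
    PySem.Dict Int Int × PySem.Dict Int (List Int) :=
  if st.1.contains v then st else (st.1.insert v v, st.2.insert v [v])

def pvMerge (st : PySem.Dict Int Int × PySem.Dict Int (List Int)) (x y : Int) :
    PySem.Dict Int Int × PySem.Dict Int (List Int) :=
  let st1 := pvTouch (pvTouch st x) y
  let lx0 := st1.1.getD x x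
  let ly0 := st1.1.getD y y
  if lx0 == ly0 then st1
  else
    let mx0 := st1.2.getD lx0 []
    let my0 := st1.2.getD ly0 []
    let s : Int × Int × List Int × List Int :=
      if mx0.length > my0.length then (ly0, lx0, my0, mx0) else (lx0, ly0, mx0, my0)
    let lab := s.2.2.1.foldl (fun lab v => lab.insert v s.2.1) st1.1
    (lab, (st1.2.insert s.2.1 (s.2.2.2 ++ s.2.2.1)).erase s.1)

def areConnected_alt (n : Int) (threshold : Int) (queries : List (Int × Int)) : List Bool :=
  if threshold == 0 then queries.map (fun _ => true)
  else
    let st := (PySem.List.pyRange (max (threshold + 1) 1) (n + 1) 1).foldl (fun st x =>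
      (PySem.List.pyRange (2 * x) (n + 1) x).foldl (fun st y => pvMerge st x y) st)
      ((PySem.Dict.empty : PySem.Dict Int Int), (PySem.Dict.empty : PySem.Dict Int (List Int)))
    queries.map (fun q => q.1 == q.2 ||
      (st.1.contains q.1 && st.1.contains q.2 && st.1.getD q.1 q.1 == st.1.getD q.2 q.2))

-- ===== PRECONDITION & SPEC =====
def Spec_areConnected (n : Int) (threshold : Int) (queries : List (Int × Int)) (out : List Bool) : Prop := out = areConnected_alt n threshold queries
instance (n : Int) (threshold : Int) (queries : List (Int × Int)) (out : List Bool) : Decidable (Spec_areConnected n threshold queries out) := by unfold Spec_areConnected; infer_instance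

-- ===== CLAIM (what is proved, stated in full; the proofs are below) =====
def Claim_equal_areConnected : Prop := ∀ (n : Int) (threshold : Int) (queries : List (Int × Int)), Dom_areConnected n threshold queries → Spec_areConnected n threshold queries (areConnected n threshold queries)

-- ===== LEMMAS AND PROOFS =====

-- ---- abstract view of A's union-find state ----
def pvChase : Nat → PySem.Dict Int Int → Int → Int
  | 0, _, z => z
  | k + 1, uf, z =>
    match uf.get? z with
    | none => z
    | some p => pvChase k uf p

def pvSink (uf : PySem.Dict Int Int) (z : Int) : Int := pvChase uf.size uf z

def pvTerm (uf : PySem.Dict Int Int) : Prop := ∀ z, uf.get? (pvSink uf z) = none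

-- ---- abstract view of B's partition state ----
def pvPartEq (st : PySem.Dict Int Int × PySem.Dict Int (List Int)) (a b : Int) : Prop :=
  a = b ∨ ∃ l, st.1.get? a = some l ∧ st.1.get? b = some l

def pvInvB (st : PySem.Dict Int Int × PySem.Dict Int (List Int)) : Prop :=
  (∀ l m, st.2.get? l = some m → ∀ v, v ∈ m ↔ st.1.get? v = some l) ∧
  (∀ v l, st.1.get? v = some l → ∃ m, st.2.get? l = some m) ∧
  (∀ v l, st.1.get? v = some l → st.1.get? l = some l)

def pvRel (uf : PySem.Dict Int Int) (st : PySem.Dict Int Int × PySem.Dict Int (List Int)) : Prop :=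
  pvTerm uf ∧ pvInvB st ∧ ∀ a b, pvSink uf a = pvSink uf b ↔ pvPartEq st a b

theorem pv_chase_none (uf : PySem.Dict Int Int) (z : Int) (h : uf.get? z = none) :
    ∀ j, pvChase j uf z = z := by
  intro j; cases j with
  | zero => rfl
  | succ j => simp [pvChase, h]

theorem pv_chase_stable (uf : PySem.Dict Int Int) :
    ∀ k z, uf.get? (pvChase k uf z) = none → ∀ j, k ≤ j → pvChase j uf z = pvChase k uf z := by
  intro k
  induction k with
  | zero => intro z h j _; exact pv_chase_none uf z h j
  | succ k ih =>
    intro z h j hj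
    cases hz : uf.get? z with
    | none =>
      rw [pv_chase_none uf z hz, pv_chase_none uf z hz]
    | some p =>
      obtain ⟨j', rfl⟩ : ∃ j', j = j' + 1 := ⟨j - 1, by omega⟩
      have e1 : pvChase (k + 1) uf z = pvChase k uf p := by simp [pvChase, hz]
      have e2 : pvChase (j' + 1) uf z = pvChase j' uf p := by simp [pvChase, hz]
      rw [e1, e2]
      rw [e1] at h
      exact ih p h j' (by omega)

theorem pv_chase_add (uf : PySem.Dict Int Int) :
    ∀ a b z, pvChase (a + b) uf z = pvChase b uf (pvChase a uf z) := by
  intro a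
  induction a with
  | zero => intro b z; simp [pvChase]
  | succ a ih =>
    intro b z
    cases hz : uf.get? z with
    | none =>
      simp [pv_chase_none uf z hz]
    | some p =>
      have e1 : pvChase (a + 1) uf z = pvChase a uf p := by simp [pvChase, hz]
      have e2 : a + 1 + b = (a + b) + 1 := by omega
      have e3 : pvChase ((a + b) + 1) uf z = pvChase (a + b) uf p := by simp [pvChase, hz]
      rw [e1, e2, e3, ih b p]

theorem pv_sink_fixed (uf : PySem.Dict Int Int) (hT : pvTerm uf) (z : Int) :
    ∀ j, uf.size ≤ j → pvChase j uf z = pvSink uf z := by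
  intro j hj; exact pv_chase_stable uf uf.size z (hT z) j hj

-- if the chain from z reaches a sink s, then pvSink uf z = s
theorem pv_sink_of_reach (uf : PySem.Dict Int Int) (hT : pvTerm uf) (m : Nat) (z s : Int)
    (hm : pvChase m uf z = s) (hs : uf.get? s = none) : pvSink uf z = s := by
  have h1 : pvChase (max m uf.size) uf z = pvChase m uf z :=
    pv_chase_stable uf m z (hm ▸ hs) _ (Nat.le_max_left _ _)
  have h2 : pvChase (max m uf.size) uf z = pvSink uf z :=
    pv_sink_fixed uf hT z _ (Nat.le_max_right _ _)
  rw [← h2, h1, hm]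

theorem pv_no_cycle (uf : PySem.Dict Int Int) (hT : pvTerm uf) (x c : Int)
    (hx : uf.get? x = some c) : ∀ k, pvChase k uf c ≠ x := by
  intro k hk
  have hper : pvChase (k + 1) uf c = c := by
    rw [pv_chase_add uf k 1 c, hk]; simp [pvChase, hx]
  have hrep : ∀ m, pvChase (m * (k + 1)) uf c = c := by
    intro m
    induction m with
    | zero => simp [pvChase]
    | succ m ih =>
      have : (m + 1) * (k + 1) = m * (k + 1) + (k + 1) := by ring
      rw [this, pv_chase_add uf (m * (k + 1)) (k + 1) c, ih, hper]
  have hstab : pvChase (uf.size * (k + 1)) uf c = pvChase uf.size uf c :=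
    pv_chase_stable uf uf.size c (hT c) _ (Nat.le_mul_of_pos_right _ (Nat.succ_pos k))
  have hc : uf.get? c = none := by
    have : c = pvChase uf.size uf c := by rw [← hstab, hrep]
    rw [this]; exact hT c
  have : pvChase k uf c = c := pv_chase_none uf c hc k
  rw [this] at hk
  rw [← hk, hc] at hx
  simp at hx

theorem pv_size_pos (uf : PySem.Dict Int Int) (x c : Int) (hx : uf.get? x = some c) :
    0 < uf.size := by
  have hm := PySem.Dict.mem_items_of_get?_eq_some uf hx
  have : uf.items ≠ [] := List.ne_nil_of_mem hm
  have : uf.items.length ≠ 0 := by simpa using congrArg List.length |>.mt (fun h => this (List.length_eq_zero_iff.mp h))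
  simp only [PySem.Dict.size]
  omega

theorem pv_sink_step (uf : PySem.Dict Int Int) (hT : pvTerm uf) (x c : Int)
    (hx : uf.get? x = some c) : pvSink uf x = pvSink uf c := by
  have h1 : pvChase (1 + uf.size) uf x = pvChase uf.size uf c := by
    rw [pv_chase_add uf 1 uf.size x]
    have : pvChase 1 uf x = c := by simp [pvChase, hx]
    rw [this]
  have h2 : pvChase (1 + uf.size) uf x = pvSink uf x := pv_sink_fixed uf hT x _ (by omega)
  rw [← h2, h1]; rfl

-- chase is unchanged by an insert at a key the chain does not visit before step j
theorem pv_chase_avoid (uf : PySem.Dict Int Int) (x v : Int) :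
    ∀ j z, (∀ m, m < j → pvChase m uf z ≠ x) →
      pvChase j (uf.insert x v) z = pvChase j uf z := by
  intro j
  induction j with
  | zero => intro z _; rfl
  | succ j ih =>
    intro z h
    have hzx : z ≠ x := h 0 (by omega)
    have hget : (uf.insert x v).get? z = uf.get? z := PySem.Dict.get?_insert_of_ne uf v hzx
    cases hz : uf.get? z with
    | none =>
      rw [pv_chase_none _ z (hget.trans hz), pv_chase_none uf z hz]
    | some p =>
      have e1 : pvChase (j + 1) (uf.insert x v) z = pvChase j (uf.insert x v) p := by
        simp [pvChase, hget, hz]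
      have e2 : pvChase (j + 1) uf z = pvChase j uf p := by simp [pvChase, hz]
      rw [e1, e2]
      exact ih p (fun m hm => by
        have := h (m + 1) (by omega)
        rwa [show pvChase (m + 1) uf z = pvChase m uf p by simp [pvChase, hz]] at this)

-- one compression step x ↦ uf[uf[x]] preserves size, sinks and termination
theorem pv_compress_step (uf : PySem.Dict Int Int) (hT : pvTerm uf) (x p pp : Int)
    (hx : uf.get? x = some p) (hp : uf.get? p = some pp) :
    (uf.insert x pp).size = uf.size ∧ pvTerm (uf.insert x pp) ∧
      ∀ z, pvSink (uf.insert x pp) z = pvSink uf z := by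
  have hc : uf.contains x = true := by
    rw [PySem.Dict.contains_eq_isSome_get?, hx]; rfl
  have hsize : (uf.insert x pp).size = uf.size := by
    rw [PySem.Dict.size_insert, if_pos hc]
  have hskip : ∀ k z, ∃ j, k ≤ j ∧ pvChase k (uf.insert x pp) z = pvChase j uf z := by
    intro k
    induction k with
    | zero => intro z; exact ⟨0, le_refl _, rfl⟩
    | succ k ih =>
      intro z
      by_cases hzx : z = x
      · subst hzx
        have e1 : pvChase (k + 1) (uf.insert z pp) z = pvChase k (uf.insert z pp) pp := by
          simp [pvChase, PySem.Dict.get?_insert_self]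
        obtain ⟨j, hj, he⟩ := ih pp
        refine ⟨j + 2, by omega, ?_⟩
        rw [e1, he]
        simp [pvChase, hx, hp]
      · have hget : (uf.insert x pp).get? z = uf.get? z := PySem.Dict.get?_insert_of_ne uf pp hzx
        cases hz : uf.get? z with
        | none =>
          exact ⟨k + 1, le_refl _, by rw [pv_chase_none _ z (hget.trans hz), pv_chase_none uf z hz]⟩
        | some p =>
          obtain ⟨j, hj, he⟩ := ih p
          refine ⟨j + 1, by omega, ?_⟩
          have e1 : pvChase (k + 1) (uf.insert x pp) z = pvChase k (uf.insert x pp) p := by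
            simp [pvChase, hget, hz]
          have e2 : pvChase (j + 1) uf z = pvChase j uf p := by simp [pvChase, hz]
          rw [e1, e2, he]
  have hsink : ∀ z, pvSink (uf.insert x pp) z = pvSink uf z := by
    intro z
    obtain ⟨j, hj, he⟩ := hskip (uf.insert x pp).size z
    have : pvChase j uf z = pvSink uf z := pv_sink_fixed uf hT z j (by omega)
    rw [pvSink, he, this]
  refine ⟨hsize, ?_, hsink⟩
  intro z
  rw [hsink z]
  have hne : pvSink uf z ≠ x := by
    intro h
    have := hT z
    rw [h, hx] at this
    simp at this
  rw [PySem.Dict.get?_insert_of_ne uf pp hne]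
  exact hT z

theorem pv_compress_spec :
    ∀ k fuel (uf : PySem.Dict Int Int) x c, pvTerm uf →
      uf.get? x = some c → uf.get? (pvChase k uf c) = none → k < fuel →
      (pvCompress fuel uf x).size = uf.size ∧ pvTerm (pvCompress fuel uf x) ∧
        (∀ z, pvSink (pvCompress fuel uf x) z = pvSink uf z) ∧
        (pvCompress fuel uf x).get? x = some (pvChase k uf c) := by
  intro k
  induction k with
  | zero =>
    intro fuel uf x c hT hx hend hk
    obtain ⟨f, rfl⟩ : ∃ f, fuel = f + 1 := ⟨fuel - 1, by omega⟩
    have hc : uf.get? c = none := hend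
    have : pvCompress (f + 1) uf x = uf := by simp [pvCompress, hx, hc]
    rw [this]
    exact ⟨rfl, hT, fun _ => rfl, hx⟩
  | succ k ih =>
    intro fuel uf x c hT hx hend hk
    obtain ⟨f, rfl⟩ : ∃ f, fuel = f + 1 := ⟨fuel - 1, by omega⟩
    cases hc : uf.get? c with
    | none =>
      have e0 : pvChase (k + 1) uf c = c := pv_chase_none uf c hc _
      have : pvCompress (f + 1) uf x = uf := by simp [pvCompress, hx, hc]
      rw [this, e0]
      exact ⟨rfl, hT, fun _ => rfl, hx⟩
    | some cc =>
      have hstep := pv_compress_step uf hT x c cc hx hc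
      set uf1 := uf.insert x cc with huf1
      have havoid : ∀ j, pvChase j uf1 cc = pvChase j uf cc := by
        intro j
        exact pv_chase_avoid uf x cc j cc (fun m _ => by
          have h1 : pvChase (m + 1) uf c = pvChase m uf cc := by simp [pvChase, hc]
          have := pv_no_cycle uf hT x c hx (m + 1)
          rw [h1] at this; exact this)
      have hch : pvChase (k + 1) uf c = pvChase k uf cc := by simp [pvChase, hc]
      have hget1x : uf1.get? x = some cc := PySem.Dict.get?_insert_self uf x cc
      have hend1 : uf1.get? (pvChase k uf1 cc) = none := by
        rw [havoid k]
        have hne : pvChase k uf cc ≠ x := by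
          have h1 : pvChase (k + 1) uf c = pvChase k uf cc := hch
          have := pv_no_cycle uf hT x c hx (k + 1)
          rw [h1] at this; exact this
        rw [huf1, PySem.Dict.get?_insert_of_ne uf cc hne, ← hch]
        exact hend
      have hrec : pvCompress (f + 1) uf x = pvCompress f uf1 x := by
        simp [pvCompress, hx, hc, huf1]
      obtain ⟨hs1, hT1, hsink1⟩ := hstep
      obtain ⟨rs, rT, rsink, rget⟩ := ih f uf1 x cc hT1 hget1x hend1 (by omega)
      refine ⟨?_, ?_, ?_, ?_⟩
      · rw [hrec, rs, hs1]
      · rw [hrec]; exact rT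
      · intro z; rw [hrec, rsink z, hsink1 z]
      · rw [hrec, rget, havoid k, hch]

theorem pv_find_spec (uf : PySem.Dict Int Int) (hT : pvTerm uf) (x : Int) :
    (pvFind (uf.size + 1) uf x).1 = pvSink uf x ∧
      pvTerm (pvFind (uf.size + 1) uf x).2 ∧
      (pvFind (uf.size + 1) uf x).2.size = uf.size ∧
      ∀ z, pvSink (pvFind (uf.size + 1) uf x).2 z = pvSink uf z := by
  cases hx : uf.get? x with
  | none =>
    have e : pvFind (uf.size + 1) uf x = (x, uf) := by simp [pvFind, hx]
    have hs : pvSink uf x = x := pv_chase_none uf x hx _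
    rw [e, hs]
    exact ⟨rfl, hT, rfl, fun _ => rfl⟩
  | some c =>
    obtain ⟨rs, rT, rsink, rget⟩ :=
      pv_compress_spec uf.size (uf.size + 1) uf x c hT hx (hT c) (by omega)
    set uf1 := pvCompress (uf.size + 1) uf x with huf1
    have hs : pvChase uf.size uf c = pvSink uf c := rfl
    have hsx : pvSink uf x = pvSink uf c := pv_sink_step uf hT x c hx
    have hget1 : uf1.get? (pvSink uf c) = none := by
      have h1 : pvSink uf c = pvSink uf1 x := by rw [← hsx, ← rsink x]
      rw [h1]; exact rT x
    obtain ⟨m, hm⟩ : ∃ m, uf.size = m + 1 :=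
      ⟨uf.size - 1, by have := pv_size_pos uf x c hx; omega⟩
    have e2 : pvFind uf.size uf1 (pvSink uf c) = (pvSink uf c, uf1) := by
      rw [hm]; simp [pvFind, hget1]
    have e1 : pvFind (uf.size + 1) uf x = pvFind uf.size uf1 (pvSink uf c) := by
      conv_lhs => rw [show uf.size + 1 = uf.size + 1 from rfl]
      simp only [pvFind, hx, ← huf1]
      rw [show uf1.get? x = some (pvSink uf c) from rget]
    rw [e1, e2, hsx]
    exact ⟨rfl, rT, rs, rsink⟩

-- linking a root px beneath another root py redirects exactly px's class
theorem pv_link_spec (uf : PySem.Dict Int Int) (hT : pvTerm uf) (px py : Int)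
    (hpx : uf.get? px = none) (hpy : uf.get? py = none) (hne : px ≠ py) :
    pvTerm (uf.insert px py) ∧
      ∀ z, pvSink (uf.insert px py) z = if pvSink uf z = px then py else pvSink uf z := by
  have hcx : uf.contains px = false := (PySem.Dict.get?_eq_none_iff_contains uf px).mp hpx
  have hsz : (uf.insert px py).size = uf.size + 1 := by
    rw [PySem.Dict.size_insert, if_neg (by simp [hcx])]
  have hsink : ∀ z, pvSink (uf.insert px py) z = if pvSink uf z = px then py else pvSink uf z := by
    intro z
    by_cases hzp : pvSink uf z = px
    · rw [if_pos hzp]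
      have hP : ∃ m, pvChase m uf z = px := ⟨uf.size, hzp⟩
      classical
      obtain ⟨m, hm, hmin⟩ : ∃ m, pvChase m uf z = px ∧ ∀ i, i < m → pvChase i uf z ≠ px :=
        ⟨Nat.find hP, Nat.find_spec hP, fun i hi => Nat.find_min hP hi⟩
      have hmle : m ≤ uf.size := by
        by_contra hlt
        exact hmin uf.size (by omega) hzp
      have hcm : pvChase m (uf.insert px py) z = px := by
        rw [pv_chase_avoid uf px py m z hmin, hm]
      have hnext : pvChase (m + 1) (uf.insert px py) z = py := by
        rw [pv_chase_add _ m 1 z, hcm]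
        simp [pvChase, PySem.Dict.get?_insert_self]
      have hpy' : (uf.insert px py).get? py = none := by
        rw [PySem.Dict.get?_insert_of_ne uf py (Ne.symm hne)]
        exact hpy
      have := pv_chase_stable (uf.insert px py) (m + 1) z (by rw [hnext]; exact hpy')
        (uf.insert px py).size (by omega)
      rw [pvSink, this, hnext]
    · rw [if_neg hzp]
      have havoid : ∀ i, pvChase i uf z ≠ px := by
        intro i hi
        exact hzp (pv_sink_of_reach uf hT i z px hi hpx)
      have h1 : pvChase (uf.insert px py).size (uf.insert px py) z
          = pvChase (uf.size + 1) uf z := by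
        rw [pv_chase_avoid uf px py _ z (fun m _ => havoid m), hsz]
      rw [pvSink, h1, pv_sink_fixed uf hT z _ (by omega)]
  refine ⟨?_, hsink⟩
  intro z
  rw [hsink z]
  by_cases hzp : pvSink uf z = px
  · rw [if_pos hzp, PySem.Dict.get?_insert_of_ne uf py (Ne.symm hne)]
    exact hpy
  · rw [if_neg hzp, PySem.Dict.get?_insert_of_ne uf py hzp]
    exact hT z

theorem pv_union_spec (uf : PySem.Dict Int Int) (hT : pvTerm uf) (x y : Int) :
    pvTerm (pvUnion uf x y) ∧
      ∀ a b, pvSink (pvUnion uf x y) a = pvSink (pvUnion uf x y) b ↔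
        (pvSink uf a = pvSink uf b ∨
          (pvSink uf a = pvSink uf x ∧ pvSink uf b = pvSink uf y) ∨
          (pvSink uf a = pvSink uf y ∧ pvSink uf b = pvSink uf x)) := by
  obtain ⟨f1v, f1T, f1s, f1sink⟩ := pv_find_spec uf hT x
  set r1 := pvFind (uf.size + 1) uf x with hr1
  obtain ⟨f2v, f2T, f2s, f2sink⟩ := pv_find_spec r1.2 f1T y
  set r2 := pvFind (r1.2.size + 1) r1.2 y with hr2
  have hpx : r1.1 = pvSink uf x := f1v
  have hpy : r2.1 = pvSink uf y := by rw [f2v, f1sink y]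
  have hsink2 : ∀ z, pvSink r2.2 z = pvSink uf z := fun z => (f2sink z).trans (f1sink z)
  have hU : pvUnion uf x y = if r1.1 == r2.1 then r2.2 else r2.2.insert r1.1 r2.1 := rfl
  by_cases heq : pvSink uf x = pvSink uf y
  · have hbeq : (r1.1 == r2.1) = true := by rw [hpx, hpy]; exact beq_iff_eq.mpr heq
    rw [hU, if_pos hbeq]
    refine ⟨f2T, fun a b => ?_⟩
    rw [hsink2 a, hsink2 b]
    constructor
    · exact fun h => Or.inl h
    · rintro (h | ⟨h1, h2⟩ | ⟨h1, h2⟩)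
      · exact h
      · rw [h1, h2, heq]
      · rw [h1, h2, heq]
  · have hbeq : (r1.1 == r2.1) = false := by
      rw [hpx, hpy]; exact beq_eq_false_iff_ne.mpr heq
    rw [hU, if_neg (by simp [hbeq])]
    have hgx : r2.2.get? r1.1 = none := by
      have : r1.1 = pvSink r2.2 x := by rw [hpx, hsink2 x]
      rw [this]; exact f2T x
    have hgy : r2.2.get? r2.1 = none := by
      have : r2.1 = pvSink r2.2 y := by rw [hpy, hsink2 y]
      rw [this]; exact f2T y
    have hne : r1.1 ≠ r2.1 := by rw [hpx, hpy]; exact heq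
    obtain ⟨lT, lsink⟩ := pv_link_spec r2.2 f2T r1.1 r2.1 hgx hgy hne
    refine ⟨lT, fun a b => ?_⟩
    rw [lsink a, lsink b, hsink2 a, hsink2 b, hpx, hpy]
    by_cases ha : pvSink uf a = pvSink uf x <;> by_cases hb : pvSink uf b = pvSink uf x <;>
      simp [ha, hb]
    exact ⟨fun h => Or.inr h.symm,
      fun h => h.elim (fun h1 => absurd h1.symm hb) (fun h2 => h2.symm)⟩

-- ---- B side ----
theorem pv_partEq_symm (st : PySem.Dict Int Int × PySem.Dict Int (List Int)) (a b : Int)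
    (h : pvPartEq st a b) : pvPartEq st b a := by
  rcases h with h | ⟨l, h1, h2⟩
  · exact Or.inl h.symm
  · exact Or.inr ⟨l, h2, h1⟩

theorem pv_partEq_trans (st : PySem.Dict Int Int × PySem.Dict Int (List Int)) (a b c : Int)
    (h1 : pvPartEq st a b) (h2 : pvPartEq st b c) : pvPartEq st a c := by
  rcases h1 with h1 | ⟨l, ha, hb⟩
  · rwa [h1]
  · rcases h2 with h2 | ⟨l', hb', hc⟩
    · exact Or.inr ⟨l, ha, h2 ▸ hb⟩
    · rw [hb] at hb'
      exact Or.inr ⟨l, ha, (Option.some.inj hb') ▸ hc⟩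

theorem pv_get?_erase {ν : Type} (d : PySem.Dict Int ν) (k k' : Int) :
    (d.erase k).get? k' = if k' = k then none else d.get? k' := by
  simp only [PySem.Dict.erase, PySem.Dict.get?]
  by_cases hk : k' = k
  · subst hk
    rw [if_pos rfl, List.find?_eq_none.mpr, Option.map_none]
    intro p hp
    rw [List.mem_filter] at hp
    simp only [Bool.not_eq_eq_eq_not, Bool.not_true] at hp
    simp [hp.2]
  · rw [if_neg hk, List.find?_filter]
    have hfun : ∀ a : Int × ν, (decide ((!(a.1 == k)) = true ∧ (a.1 == k') = true)) = (a.1 == k') := by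
      intro a
      by_cases h : a.1 = k'
      · simp [h, hk]
      · simp [h]
    simp only [hfun]
theorem pv_touch_spec (st : PySem.Dict Int Int × PySem.Dict Int (List Int)) (v : Int)
    (hI : pvInvB st) :
    pvInvB (pvTouch st v) ∧ (∀ a b, pvPartEq (pvTouch st v) a b ↔ pvPartEq st a b) ∧
      ((pvTouch st v).1.get? v).isSome := by
  obtain ⟨hM, hL, hR⟩ := hI
  by_cases hc : st.1.contains v = true
  · have he : pvTouch st v = st := by simp [pvTouch, hc]
    rw [he]
    refine ⟨⟨hM, hL, hR⟩, fun a b => Iff.rfl, ?_⟩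
    rw [← PySem.Dict.contains_eq_isSome_get?]
    exact hc
  · have hcf : st.1.contains v = false := by simpa using hc
    have he : pvTouch st v = (st.1.insert v v, st.2.insert v [v]) := by simp [pvTouch, hcf]
    rw [he]
    have hvnone : st.1.get? v = none := (PySem.Dict.get?_eq_none_iff_contains st.1 v).mpr hcf
    have hlab : ∀ u, (st.1.insert v v).get? u = if u = v then some v else st.1.get? u :=
      fun u => PySem.Dict.get?_insert st.1 v u v
    have hmem : ∀ l, (st.2.insert v [v]).get? l = if l = v then some [v] else st.2.get? l :=
      fun l => PySem.Dict.get?_insert st.2 v l [v]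
    have hfree : ∀ u l, st.1.get? u = some l → u ≠ v ∧ l ≠ v := by
      intro u l hu
      constructor
      · intro h; rw [h, hvnone] at hu; exact absurd hu (by simp)
      · intro h; rw [h] at hu; have h2 := hR u v hu; rw [hvnone] at h2; exact absurd h2 (by simp)
    refine ⟨⟨?_, ?_, ?_⟩, ?_, ?_⟩
    · -- (M)
      intro l m hlm u
      rw [hmem l] at hlm
      by_cases hlv : l = v
      · rw [if_pos hlv] at hlm
        have hm : m = [v] := (Option.some.inj hlm).symm
        rw [hm, hlab u, hlv]
        by_cases huv : u = v
        · simp [huv]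
        · simp only [List.mem_singleton, huv, false_iff]
          intro hu
          exact (hfree u v hu).2 rfl
      · rw [if_neg hlv] at hlm
        rw [hM l m hlm u, hlab u]
        by_cases huv : u = v
        · subst huv
          rw [if_pos rfl, hvnone]
          constructor
          · intro h; exact absurd h (by simp)
          · intro h; injection h with h; exact absurd h.symm hlv
        · rw [if_neg huv]
    · -- (L)
      intro u l hu
      rw [hlab u] at hu
      by_cases huv : u = v
      · rw [if_pos huv] at hu
        injection hu with hu
        exact ⟨[v], by rw [hmem l, if_pos hu.symm]⟩
      · rw [if_neg huv] at hu
        obtain ⟨m, hm⟩ := hL u l hu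
        refine ⟨m, ?_⟩
        rw [hmem l, if_neg (hfree u l hu).2, hm]
    · -- (R)
      intro u l hu
      rw [hlab u] at hu
      by_cases huv : u = v
      · rw [if_pos huv] at hu
        injection hu with hu
        rw [hlab l, if_pos hu.symm, hu]
      · rw [if_neg huv] at hu
        rw [hlab l, if_neg (hfree u l hu).2]
        exact hR u l hu
    · -- partEq preserved
      intro a b
      constructor
      · rintro (h | ⟨l, ha, hb⟩)
        · exact Or.inl h
        · rw [hlab a] at ha; rw [hlab b] at hb
          by_cases hav : a = v <;> by_cases hbv : b = v
          · exact Or.inl (hav.trans hbv.symm)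
          · rw [if_pos hav] at ha; rw [if_neg hbv] at hb
            injection ha with ha
            rw [← ha] at hb
            exact absurd rfl (hfree b v hb).2
          · rw [if_neg hav] at ha; rw [if_pos hbv] at hb
            injection hb with hb
            rw [← hb] at ha
            exact absurd rfl (hfree a v ha).2
          · rw [if_neg hav] at ha; rw [if_neg hbv] at hb
            exact Or.inr ⟨l, ha, hb⟩
      · rintro (h | ⟨l, ha, hb⟩)
        · exact Or.inl h
        · refine Or.inr ⟨l, ?_, ?_⟩
          · rw [hlab a, if_neg (hfree a l ha).1]; exact ha
          · rw [hlab b, if_neg (hfree b l hb).1]; exact hb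
    · -- v now labelled
      rw [hlab v, if_pos rfl]
      rfl

theorem pv_touch_mono (st : PySem.Dict Int Int × PySem.Dict Int (List Int)) (v u : Int)
    (h : ((st.1).get? u).isSome) : ((pvTouch st v).1.get? u).isSome := by
  by_cases hc : st.1.contains v = true
  · simp [pvTouch, hc, h]
  · have hcf : st.1.contains v = false := by simpa using hc
    simp only [pvTouch, hcf, Bool.false_eq_true, if_false]
    rw [PySem.Dict.get?_insert st.1 v u v]
    by_cases huv : u = v
    · rw [if_pos huv]; rfl
    · rw [if_neg huv]; exact h

theorem pv_foldl_insert_get? (w : Int) (mx : List Int) :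
    ∀ (d : PySem.Dict Int Int) (u : Int),
      (mx.foldl (fun d v => d.insert v w) d).get? u = if u ∈ mx then some w else d.get? u := by
  induction mx with
  | nil => intro d u; simp
  | cons v rest ih =>
    intro d u
    rw [List.foldl_cons, ih]
    by_cases hur : u ∈ rest
    · simp [hur]
    · rw [if_neg hur, PySem.Dict.get?_insert d v u w]
      by_cases huv : u = v
      · simp [huv]
      · simp [huv, hur]

-- relabelling the class of lx (members mx) to ly, concatenating member lists
theorem pv_relabel_spec (st1 : PySem.Dict Int Int × PySem.Dict Int (List Int))
    (x y lx ly : Int) (mx my : List Int) (hI : pvInvB st1)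
    (hx : st1.1.get? x = some lx) (hy : st1.1.get? y = some ly) (hne : lx ≠ ly)
    (hmx : st1.2.get? lx = some mx) (hmy : st1.2.get? ly = some my) :
    pvInvB (mx.foldl (fun d v => d.insert v ly) st1.1,
        (st1.2.insert ly (my ++ mx)).erase lx) ∧
      ∀ a b, pvPartEq (mx.foldl (fun d v => d.insert v ly) st1.1,
          (st1.2.insert ly (my ++ mx)).erase lx) a b ↔
        (pvPartEq st1 a b ∨ (pvPartEq st1 a x ∧ pvPartEq st1 b y) ∨
          (pvPartEq st1 a y ∧ pvPartEq st1 b x)) := by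
  obtain ⟨hM, hL, hR⟩ := hI
  have hmxc : ∀ u, u ∈ mx ↔ st1.1.get? u = some lx := hM lx mx hmx
  have hmyc : ∀ u, u ∈ my ↔ st1.1.get? u = some ly := hM ly my hmy
  have hlab : ∀ u, (mx.foldl (fun d v => d.insert v ly) st1.1).get? u =
      if u ∈ mx then some ly else st1.1.get? u := fun u => pv_foldl_insert_get? ly mx st1.1 u
  have hlab' : ∀ u, (mx.foldl (fun d v => d.insert v ly) st1.1).get? u =
      if st1.1.get? u = some lx then some ly else st1.1.get? u := by
    intro u
    rw [hlab u]
    by_cases h : u ∈ mx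
    · rw [if_pos h, if_pos ((hmxc u).mp h)]
    · rw [if_neg h, if_neg (fun hh => h ((hmxc u).mpr hh))]
  have hmem : ∀ l, ((st1.2.insert ly (my ++ mx)).erase lx).get? l =
      if l = lx then none else if l = ly then some (my ++ mx) else st1.2.get? l := by
    intro l
    rw [pv_get?_erase]
    by_cases h : l = lx
    · rw [if_pos h, if_pos h]
    · rw [if_neg h, if_neg h, PySem.Dict.get?_insert st1.2 ly l (my ++ mx)]
  -- partEq of a node with x is exactly "labelled lx" (and with y, "labelled ly")
  have hpx : ∀ a, pvPartEq st1 a x ↔ st1.1.get? a = some lx := by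
    intro a
    constructor
    · rintro (h | ⟨l, ha, hb⟩)
      · rw [h]; exact hx
      · rw [hx] at hb; rwa [← Option.some.inj hb] at ha
    · intro h; exact Or.inr ⟨lx, h, hx⟩
  have hpy : ∀ a, pvPartEq st1 a y ↔ st1.1.get? a = some ly := by
    intro a
    constructor
    · rintro (h | ⟨l, ha, hb⟩)
      · rw [h]; exact hy
      · rw [hy] at hb; rwa [← Option.some.inj hb] at ha
    · intro h; exact Or.inr ⟨ly, h, hy⟩
  refine ⟨⟨?_, ?_, ?_⟩, ?_⟩
  · -- (M)
    intro l m hlm u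
    rw [hmem l] at hlm
    by_cases hllx : l = lx
    · rw [if_pos hllx] at hlm; exact absurd hlm (by simp)
    · rw [if_neg hllx] at hlm
      by_cases hlly : l = ly
      · rw [if_pos hlly] at hlm
        have hm : m = my ++ mx := (Option.some.inj hlm).symm
        rw [hm, hlab' u, hlly, List.mem_append, hmxc u, hmyc u]
        by_cases hu : st1.1.get? u = some lx
        · simp [hu]
        · simp [hu]
      · rw [if_neg hlly] at hlm
        rw [hM l m hlm u, hlab' u]
        by_cases hu : st1.1.get? u = some lx
        · rw [if_pos hu, hu]
          constructor
          · intro h; exact absurd (Option.some.inj h).symm hllx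
          · intro h; exact absurd (Option.some.inj h).symm hlly
        · rw [if_neg hu]
  · -- (L)
    intro u l hu
    rw [hlab' u] at hu
    by_cases hul : st1.1.get? u = some lx
    · rw [if_pos hul] at hu
      have hl : l = ly := (Option.some.inj hu).symm
      exact ⟨my ++ mx, by rw [hmem l, if_neg (by rw [hl]; exact fun h => hne h.symm), hl, if_pos rfl]⟩
    · rw [if_neg hul] at hu
      by_cases hlly : l = ly
      · exact ⟨my ++ mx, by rw [hmem l, if_neg (by rw [hlly]; exact fun h => hne h.symm), hlly, if_pos rfl]⟩
      · have hllx : l ≠ lx := by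
          intro h
          rw [h] at hu
          exact hul hu
        obtain ⟨m, hm⟩ := hL u l hu
        exact ⟨m, by rw [hmem l, if_neg hllx, if_neg hlly, hm]⟩
  · -- (R)
    intro u l hu
    rw [hlab' u] at hu
    by_cases hul : st1.1.get? u = some lx
    · rw [if_pos hul] at hu
      have hl : l = ly := (Option.some.inj hu).symm
      rw [hlab' l, hl, if_neg (by rw [hR y ly hy]; exact fun h => hne (Option.some.inj h).symm)]
      exact hR y ly hy
    · rw [if_neg hul] at hu
      have hll : st1.1.get? l = some l := hR u l hu
      rw [hlab' l, if_neg (by rw [hll]; exact fun h => hul (by rw [Option.some.inj h] at hu; exact absurd hu hul))]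
      exact hll
  · -- partEq characterisation
    intro a b
    simp only [pvPartEq]
    constructor
    · rintro (h | ⟨l, ha, hb⟩)
      · exact Or.inl (Or.inl h)
      · rw [hlab' a] at ha; rw [hlab' b] at hb
        by_cases hal : st1.1.get? a = some lx <;> by_cases hbl : st1.1.get? b = some lx
        · exact Or.inl (Or.inr ⟨lx, hal, hbl⟩)
        · rw [if_pos hal] at ha
          rw [if_neg hbl] at hb
          have : l = ly := (Option.some.inj ha).symm
          rw [this] at hb
          exact Or.inr (Or.inl ⟨(hpx a).mpr hal, (hpy b).mpr hb⟩)
        · rw [if_neg hal] at ha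
          rw [if_pos hbl] at hb
          have : l = ly := (Option.some.inj hb).symm
          rw [this] at ha
          exact Or.inr (Or.inr ⟨(hpy a).mpr ha, (hpx b).mpr hbl⟩)
        · rw [if_neg hal] at ha
          rw [if_neg hbl] at hb
          exact Or.inl (Or.inr ⟨l, ha, hb⟩)
    · have lift : ∀ u l, st1.1.get? u = some l →
          (mx.foldl (fun d v => d.insert v ly) st1.1).get? u =
            some (if l = lx then ly else l) := by
        intro u l hu
        rw [hlab' u]
        by_cases hul : st1.1.get? u = some lx
        · rw [if_pos hul]
          have : l = lx := Option.some.inj (hu.symm.trans hul)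
          rw [if_pos this]
        · rw [if_neg hul, hu]
          have : l ≠ lx := fun h => hul (h ▸ hu)
          rw [if_neg this]
      rintro ((h | ⟨l, ha, hb⟩) | ⟨ha, hb⟩ | ⟨ha, hb⟩)
      · exact Or.inl h
      · exact Or.inr ⟨_, lift a l ha, lift b l hb⟩
      · refine Or.inr ⟨ly, ?_, ?_⟩
        · have := lift a lx ((hpx a).mp ha)
          rwa [if_pos rfl] at this
        · have := lift b ly ((hpy b).mp hb)
          rwa [if_neg (fun h => hne h.symm)] at this
      · refine Or.inr ⟨ly, ?_, ?_⟩
        · have := lift a ly ((hpy a).mp ha)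
          rwa [if_neg (fun h => hne h.symm)] at this
        · have := lift b lx ((hpx b).mp hb)
          rwa [if_pos rfl] at this

theorem pv_merge_spec (st : PySem.Dict Int Int × PySem.Dict Int (List Int)) (x y : Int)
    (hI : pvInvB st) :
    pvInvB (pvMerge st x y) ∧
      ∀ a b, pvPartEq (pvMerge st x y) a b ↔
        (pvPartEq st a b ∨ (pvPartEq st a x ∧ pvPartEq st b y) ∨
          (pvPartEq st a y ∧ pvPartEq st b x)) := by
  obtain ⟨hI1, hp1, hx1⟩ := pv_touch_spec st x hI
  obtain ⟨hI2, hp2, hy2⟩ := pv_touch_spec (pvTouch st x) y hI1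
  have hx2 : ((pvTouch (pvTouch st x) y).1.get? x).isSome := pv_touch_mono _ y x hx1
  simp only [pvMerge]
  set st1 := pvTouch (pvTouch st x) y with hst1
  obtain ⟨lx, hlx⟩ := Option.isSome_iff_exists.mp hx2
  obtain ⟨ly, hly⟩ := Option.isSome_iff_exists.mp hy2
  have e1 : st1.1.getD x x = lx := PySem.Dict.getD_of_get?_eq_some st1.1 _ hlx
  have e2 : st1.1.getD y y = ly := PySem.Dict.getD_of_get?_eq_some st1.1 _ hly
  have pres : ∀ a b, pvPartEq st1 a b ↔ pvPartEq st a b :=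
    fun a b => (hp2 a b).trans (hp1 a b)
  rw [e1, e2]
  by_cases hll : lx = ly
  · rw [if_pos (beq_iff_eq.mpr hll)]
    have hxy : pvPartEq st x y :=
      (pres x y).mp (Or.inr ⟨lx, hlx, hll ▸ hly⟩)
    refine ⟨hI2, fun a b => ?_⟩
    rw [pres a b]
    constructor
    · exact fun h => Or.inl h
    · rintro (h | ⟨ha, hb⟩ | ⟨ha, hb⟩)
      · exact h
      · exact pv_partEq_trans st a x b ha (pv_partEq_trans st x y b hxy (pv_partEq_symm st b y hb))
      · exact pv_partEq_trans st a y b ha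
          (pv_partEq_trans st y x b (pv_partEq_symm st x y hxy) (pv_partEq_symm st b x hb))
  · rw [if_neg (by simpa using hll)]
    obtain ⟨mx, hmx⟩ := hI2.2.1 x lx hlx
    obtain ⟨my, hmy⟩ := hI2.2.1 y ly hly
    have e3 : st1.2.getD lx [] = mx := PySem.Dict.getD_of_get?_eq_some st1.2 _ hmx
    have e4 : st1.2.getD ly [] = my := PySem.Dict.getD_of_get?_eq_some st1.2 _ hmy
    rw [e3, e4]
    by_cases hlen : mx.length > my.length
    · rw [if_pos hlen]
      obtain ⟨rI, riff⟩ := pv_relabel_spec st1 y x ly lx my mx hI2 hly hlx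
        (fun h => hll h.symm) hmy hmx
      refine ⟨rI, fun a b => ?_⟩
      rw [riff a b, pres a b, pres a x, pres a y, pres b x, pres b y]
      tauto
    · rw [if_neg hlen]
      obtain ⟨rI, riff⟩ := pv_relabel_spec st1 x y lx ly mx my hI2 hlx hly hll hmx hmy
      refine ⟨rI, fun a b => ?_⟩
      rw [riff a b, pres a b, pres a x, pres a y, pres b x, pres b y]

-- ---- combining ----
theorem pv_rel_step (uf : PySem.Dict Int Int) (st : PySem.Dict Int Int × PySem.Dict Int (List Int))
    (x y : Int) (h : pvRel uf st) : pvRel (pvUnion uf x y) (pvMerge st x y) := by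
  obtain ⟨hT, hI, hE⟩ := h
  obtain ⟨uT, uiff⟩ := pv_union_spec uf hT x y
  obtain ⟨mI, miff⟩ := pv_merge_spec st x y hI
  refine ⟨uT, mI, fun a b => ?_⟩
  rw [uiff a b, miff a b, hE a b, hE a x, hE a y, hE b x, hE b y]

theorem pv_rel_inner (x : Int) (ys : List Int) :
    ∀ uf st, pvRel uf st →
      pvRel (ys.foldl (fun uf y => pvUnion uf x y) uf) (ys.foldl (fun st y => pvMerge st x y) st) := by
  induction ys with
  | nil => exact fun uf st h => h
  | cons y ys ih => exact fun uf st h => ih _ _ (pv_rel_step uf st x y h)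

theorem pv_rel_outer (threshold : Int) (n : Int) (xs : List Int)
    (hxs : ∀ x ∈ xs, threshold < x) :
    ∀ uf st, pvRel uf st →
      pvRel (xs.foldl (fun uf x => (PySem.List.pyRange (2 * x) (n + 1) x).foldl
              (fun uf y => if x > threshold then pvUnion uf x y else uf) uf) uf)
            (xs.foldl (fun st x => (PySem.List.pyRange (2 * x) (n + 1) x).foldl
              (fun st y => pvMerge st x y) st) st) := by
  revert hxs
  induction xs with
  | nil => intro _ uf st h; exact h
  | cons x xs ih =>
    intro hxs uf st h
    simp only [List.foldl_cons]
    have hfn : (fun uf y => if x > threshold then pvUnion uf x y else uf)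
        = fun (uf : PySem.Dict Int Int) y => pvUnion uf x y := by
      funext uf' y'
      rw [if_pos (hxs x List.mem_cons_self)]
    rw [hfn]
    exact ih (fun z hz => hxs z (List.mem_cons_of_mem x hz)) _ _
      (pv_rel_inner x (PySem.List.pyRange (2 * x) (n + 1) x) uf st h)

theorem pv_skip_fold (threshold : Int) (n : Int) (xs : List Int)
    (hxs : ∀ x ∈ xs, ¬ threshold < x) (uf : PySem.Dict Int Int) :
    xs.foldl (fun uf x => (PySem.List.pyRange (2 * x) (n + 1) x).foldl
      (fun uf y => if x > threshold then pvUnion uf x y else uf) uf) uf = uf := by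
  revert hxs
  induction xs generalizing uf with
  | nil => intro _; rfl
  | cons x xs ih =>
    intro hxs
    simp only [List.foldl_cons]
    have hinner : (PySem.List.pyRange (2 * x) (n + 1) x).foldl
        (fun uf y => if x > threshold then pvUnion uf x y else uf) uf = uf := by
      have hfn : (fun uf y => if x > threshold then pvUnion uf x y else uf)
          = fun (uf : PySem.Dict Int Int) (_ : Int) => uf := by
        funext uf' y'
        rw [if_neg (hxs x List.mem_cons_self)]
      rw [hfn]
      generalize PySem.List.pyRange (2 * x) (n + 1) x = l
      induction l with
      | nil => rfl
      | cons _ _ ih2 => exact ih2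
    rw [hinner]
    exact ih uf (fun z hz => hxs z (List.mem_cons_of_mem x hz))

theorem pv_rel_init : pvRel PySem.Dict.empty (PySem.Dict.empty, PySem.Dict.empty) := by
  have hsink : ∀ z, pvSink (PySem.Dict.empty : PySem.Dict Int Int) z = z := by
    intro z
    simp [pvSink, PySem.Dict.size_empty, pvChase]
  refine ⟨?_, ⟨?_, ?_, ?_⟩, ?_⟩
  · intro z; rw [hsink z]; exact PySem.Dict.get?_empty z
  · intro l m hlm; rw [PySem.Dict.get?_empty] at hlm; exact absurd hlm (by simp)
  · intro v l hv; rw [PySem.Dict.get?_empty] at hv; exact absurd hv (by simp)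
  · intro v l hv; rw [PySem.Dict.get?_empty] at hv; exact absurd hv (by simp)
  · intro a b
    rw [hsink a, hsink b]
    simp [pvPartEq, PySem.Dict.get?_empty]

theorem pv_query_bool (uf : PySem.Dict Int Int)
    (st : PySem.Dict Int Int × PySem.Dict Int (List Int)) (h : pvRel uf st) (a b : Int) :
    (pvSink uf a == pvSink uf b) =
      (a == b || (st.1.contains a && st.1.contains b && st.1.getD a a == st.1.getD b b)) := by
  have hiff := h.2.2 a b
  rw [Bool.eq_iff_iff]
  simp only [beq_iff_eq, Bool.or_eq_true, Bool.and_eq_true]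
  rw [hiff]
  constructor
  · rintro (hab | ⟨l, ha, hb⟩)
    · exact Or.inl hab
    · refine Or.inr ⟨⟨?_, ?_⟩, ?_⟩
      · rw [PySem.Dict.contains_eq_isSome_get?, ha]; rfl
      · rw [PySem.Dict.contains_eq_isSome_get?, hb]; rfl
      · rw [PySem.Dict.getD_of_get?_eq_some st.1 a ha, PySem.Dict.getD_of_get?_eq_some st.1 b hb]
  · rintro (hab | ⟨⟨hca, hcb⟩, hgd⟩)
    · exact Or.inl hab
    · rw [PySem.Dict.contains_eq_isSome_get?] at hca hcb
      obtain ⟨la, hla⟩ := Option.isSome_iff_exists.mp hca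
      obtain ⟨lb, hlb⟩ := Option.isSome_iff_exists.mp hcb
      rw [PySem.Dict.getD_of_get?_eq_some st.1 a hla, PySem.Dict.getD_of_get?_eq_some st.1 b hlb] at hgd
      exact Or.inr ⟨la, hla, by rw [hgd]; exact hlb⟩

theorem pv_query_fold (uf0 : PySem.Dict Int Int) (qs : List (Int × Int)) :
    ∀ (acc : List Bool) (uf : PySem.Dict Int Int), pvTerm uf → (∀ z, pvSink uf z = pvSink uf0 z) →
      (qs.foldl (fun acc q =>
        let r1 := pvFind (acc.2.size + 1) acc.2 q.1
        let r2 := pvFind (r1.2.size + 1) r1.2 q.2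
        (acc.1 ++ [r1.1 == r2.1], r2.2)) ((acc, uf) : List Bool × PySem.Dict Int Int)).1 =
      acc ++ qs.map (fun q => pvSink uf0 q.1 == pvSink uf0 q.2) := by
  induction qs with
  | nil => intro acc uf _ _; simp
  | cons q qs ih =>
    intro acc uf hT hs
    simp only [List.foldl_cons, List.map_cons]
    obtain ⟨f1v, f1T, f1s, f1sink⟩ := pv_find_spec uf hT q.1
    obtain ⟨f2v, f2T, f2s, f2sink⟩ := pv_find_spec (pvFind (uf.size + 1) uf q.1).2 f1T q.2
    have hv1 : (pvFind (uf.size + 1) uf q.1).1 = pvSink uf0 q.1 := by rw [f1v, hs q.1]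
    have hv2 : (pvFind ((pvFind (uf.size + 1) uf q.1).2.size + 1)
        (pvFind (uf.size + 1) uf q.1).2 q.2).1 = pvSink uf0 q.2 := by
      rw [f2v, f1sink q.2, hs q.2]
    rw [ih (acc ++ [(pvFind (uf.size + 1) uf q.1).1 ==
          (pvFind ((pvFind (uf.size + 1) uf q.1).2.size + 1) (pvFind (uf.size + 1) uf q.1).2 q.2).1])
        _ f2T (fun z => by rw [f2sink z, f1sink z, hs z]), hv1, hv2]
    simp

-- ===== VERDICT (by name: the statement is the Claim_ definition above) =====
theorem areConnected_spec : Claim_equal_areConnected := by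
  intro n threshold queries _
  unfold Spec_areConnected
  by_cases h0 : threshold = 0
  · simp [areConnected, areConnected_alt, h0]
  · simp only [areConnected, areConnected_alt, beq_iff_eq, h0, if_false]
    set m := max (threshold + 1) 1 with hm
    have hm1 : (1 : Int) ≤ m := le_max_right _ _
    have hth : threshold < m := lt_of_lt_of_le (by omega) (le_max_left _ _)
    have hrel : pvRel
        ((PySem.List.pyRange 1 (n + 1) 1).foldl (fun uf x =>
          (PySem.List.pyRange (2 * x) (n + 1) x).foldl (fun uf y =>
            if x > threshold then pvUnion uf x y else uf) uf) PySem.Dict.empty)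
        ((PySem.List.pyRange m (n + 1) 1).foldl (fun st x =>
          (PySem.List.pyRange (2 * x) (n + 1) x).foldl (fun st y =>
            pvMerge st x y) st) (PySem.Dict.empty, PySem.Dict.empty)) := by
      by_cases hmn : m ≤ n + 1
      · rw [PySem.List.pyRange_one_append 1 m (n + 1) hm1 hmn, List.foldl_append]
        rw [pv_skip_fold threshold n _ (fun x hx => by
          rw [PySem.List.mem_pyRange_one] at hx
          rcases max_cases (threshold + 1) 1 with ⟨he, _⟩ | ⟨he, _⟩ <;> omega) PySem.Dict.empty]
        exact pv_rel_outer threshold n _ (fun x hx => by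
          rw [PySem.List.mem_pyRange_one] at hx
          omega) PySem.Dict.empty _ pv_rel_init
      · have hB : PySem.List.pyRange m (n + 1) 1 = [] := by
          rw [PySem.List.pyRange_one]
          have he : (n + 1 - m).toNat = 0 := by omega
          rw [he]
          simp
        rw [hB]
        simp only [List.foldl_nil]
        rw [pv_skip_fold threshold n _ (fun x hx => by
          rw [PySem.List.mem_pyRange_one] at hx
          rcases max_cases (threshold + 1) 1 with ⟨he, _⟩ | ⟨he, _⟩ <;> omega) PySem.Dict.empty]
        exact pv_rel_init
    set ufA := (PySem.List.pyRange 1 (n + 1) 1).foldl (fun uf x =>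
      (PySem.List.pyRange (2 * x) (n + 1) x).foldl (fun uf y =>
        if x > threshold then pvUnion uf x y else uf) uf) PySem.Dict.empty with hufA
    set stB := (PySem.List.pyRange m (n + 1) 1).foldl (fun st x =>
      (PySem.List.pyRange (2 * x) (n + 1) x).foldl (fun st y =>
        pvMerge st x y) st) (PySem.Dict.empty, PySem.Dict.empty) with hstB
    have hA : (queries.foldl (fun acc q =>
        let r1 := pvFind (acc.2.size + 1) acc.2 q.1
        let r2 := pvFind (r1.2.size + 1) r1.2 q.2
        (acc.1 ++ [r1.1 == r2.1], r2.2)) (([] : List Bool), ufA)).1 =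
        queries.map (fun q => pvSink ufA q.1 == pvSink ufA q.2) := by
      have := pv_query_fold ufA queries [] ufA hrel.1 (fun z => rfl)
      simpa using this
    rw [hA]
    exact List.map_congr_left (fun q _ => pv_query_bool ufA stB hrel q.1 q.2)
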